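-- pv_equiv track=rewrite | github.com/atimics/microgpt | test_model_serialization.py | extract_samples
-- ===== SOURCE A (Python) =====
-- def extract_samples(output):
--     """Extract generated samples from stdout."""
--     samples = []
--     for line in output.split('\n'):
--         if line.startswith('sample '):
--             # Extract the sample text after "sample N: "
--             parts = line.split(': ', 1)
--             if len(parts) == 2:
--                 samples.append(parts[1])
--     return samples
-- ===== SOURCE B (Python) =====
-- import re
--
-- def extract_samples(output):
--     """Extract generated samples from stdout."""
--     # one multiline regex scan: anchor at line start, literal 'sample ',
--     # non-greedy up to the first ': ', capture the rest of the line
--     return re.findall(r'^sample .*?: (.*)$', output, re.MULTILINE)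
-- ===== Notes on version B (the rewrite author's own statement) =====
-- stated objective: idiomatic
-- what changed: Replaced the per-line startswith/bounded-split loop with one multiline regular-expression scan (re.findall with a pattern anchored at line start: literal sample prefix, non-greedy skip to the first colon-space separator, then a capture of the rest of the line), producing all samples in a single pattern-matched pass with no intermediate line list.
import Mathlib
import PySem

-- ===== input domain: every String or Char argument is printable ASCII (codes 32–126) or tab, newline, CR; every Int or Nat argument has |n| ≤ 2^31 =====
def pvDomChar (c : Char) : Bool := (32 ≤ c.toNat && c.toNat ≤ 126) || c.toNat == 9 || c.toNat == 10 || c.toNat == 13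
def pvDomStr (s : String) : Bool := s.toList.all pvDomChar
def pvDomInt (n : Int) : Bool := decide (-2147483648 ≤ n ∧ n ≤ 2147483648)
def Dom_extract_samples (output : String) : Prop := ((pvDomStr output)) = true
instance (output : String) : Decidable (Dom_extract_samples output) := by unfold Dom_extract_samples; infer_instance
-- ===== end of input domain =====

-- B replaces A's split/startswith/split loop by a single multiline-regex scan
-- (re.findall(r'^sample .*?: (.*)$', output, re.MULTILINE)); objective: idiomatic.

-- ===== PORT A =====
def extract_samples (output : String) : List String :=
  ((PySem.Str.split? output "\n").getD []).foldl
    (fun samples line =>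
      if PySem.Str.startswith line "sample " then
        -- parts = line.split(': ', 1)
        let parts := (PySem.Str.splitMax? line ": " 1).getD []
        if parts.length == 2 then samples ++ [parts.getD 1 ""] else samples
      else samples) []

-- ===== PORT B =====
-- Hand-port of the regex engine on the fixed pattern r'^sample .*?: (.*)$' with
-- re.MULTILINE ('.' never matches '\n').  Exact for this pattern: a match can only
-- start where '^' matches (start of string or just after '\n'), and a match never
-- crosses a '\n', so after trying one line start the engine's next possible match
-- position is just after the next '\n'.

-- '.*?: ' (non-greedy): remainder after the FIRST ': ' reachable without crossing '\n'
def pvNonGreedy : List Char → Option (List Char)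
  | [] => none
  | [_] => none
  | c :: d :: rest =>
    if c = ':' ∧ d = ' ' then some rest
    else if c = '\n' then none else pvNonGreedy (d :: rest)

-- '(.*)$' (greedy, no DOTALL): capture everything up to the next '\n' or the end
def pvCapture : List Char → List Char
  | [] => []
  | c :: rest => if c = '\n' then [] else c :: pvCapture rest

-- advance the scan position to just after the next '\n' (none: no further '^')
def pvNextLine : List Char → Option (List Char)
  | [] => none
  | c :: rest => if c = '\n' then some rest else pvNextLine rest

theorem pvNextLine_lt : ∀ (cs r : List Char), pvNextLine cs = some r → r.length < cs.length := by
  intro cs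
  induction cs with
  | nil => intro r h; simp [pvNextLine] at h
  | cons c rest ih =>
    intro r h
    simp only [pvNextLine] at h
    by_cases hc : c = '\n'
    · rw [if_pos hc] at h
      cases h
      simp only [List.length_cons]
      omega
    · rw [if_neg hc] at h
      have := ih r h
      simp only [List.length_cons]
      omega

-- findall: try the pattern at this '^' position, then continue after the next '\n'
def pvFindall (cs : List Char) : List String :=
  (match (if List.isPrefixOf "sample ".toList cs then pvNonGreedy (List.drop 7 cs) else none) with
   | some after => [String.ofList (pvCapture after)]
   | none => []) ++
  (match h : pvNextLine cs with
   | some rest => pvFindall rest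
   | none => [])
termination_by cs.length
decreasing_by exact pvNextLine_lt cs rest h

def extract_samples_alt (output : String) : List String := pvFindall output.toList

-- ===== PRECONDITION & SPEC =====
def Spec_extract_samples (output : String) (out : List String) : Prop := out = extract_samples_alt output
instance (output : String) (out : List String) : Decidable (Spec_extract_samples output out) := by unfold Spec_extract_samples; infer_instance

-- ===== CLAIM (what is proved, stated in full; the proofs are below) =====
def Claim_equal_extract_samples : Prop := ∀ (output : String), Dom_extract_samples output → Spec_extract_samples output (extract_samples output)

-- ===== LEMMAS AND PROOFS =====

-- proof-side characterisations
def pvLines : List Char → List (List Char)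
  | [] => [[]]
  | c :: rest =>
    if c = '\n' then [] :: pvLines rest
    else (c :: (pvLines rest).headI) :: (pvLines rest).tail

def pvFirstLine : List Char → List Char
  | [] => []
  | c :: rest => if c = '\n' then [] else c :: pvFirstLine rest

def pvBreakCS : List Char → Option (List Char × List Char)
  | [] => none
  | [_] => none
  | c :: d :: rest =>
    if c = ':' ∧ d = ' ' then some ([], rest)
    else match pvBreakCS (d :: rest) with
         | some ba => some (c :: ba.1, ba.2)
         | none => none

-- per-line value of A, on the char level
def pvLineOut (l : List Char) : List String :=
  if List.isPrefixOf "sample ".toList l then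
    match pvBreakCS l with
    | some ba => [String.ofList ba.2]
    | none => []
  else []

theorem pvLines_ne_nil (cs : List Char) : pvLines cs ≠ [] := by
  cases cs with
  | nil => simp [pvLines]
  | cons c rest => by_cases hc : c = '\n' <;> simp [pvLines, hc]

theorem splitOn_go_eq : ∀ (fuel : Nat) (cs cur : List Char) (acc : List (List Char)),
    cs.length ≤ fuel →
    PySem.Chars.splitOn.go ['\n'] fuel cs cur acc
      = acc.reverse ++ (cur.reverse ++ (pvLines cs).headI) :: (pvLines cs).tail := by
  intro fuel
  induction fuel with
  | zero =>
    intro cs cur acc h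
    have hcs : cs = [] := by cases cs <;> simp at h ⊢
    subst hcs
    rw [PySem.Chars.splitOn.go]
    simp [pvLines]
  | succ fuel ih =>
    intro cs cur acc h
    cases cs with
    | nil =>
      rw [PySem.Chars.splitOn.go]
      · simp [pvLines]
      · omega
    | cons c rest =>
      rw [PySem.Chars.splitOn.go]
      by_cases hc : c = '\n'
      · subst hc
        have hpre : ['\n'].isPrefixOf ('\n' :: rest) = true := by simp [List.isPrefixOf]
        rw [if_pos hpre]
        rw [show List.drop (['\n'].length) ('\n' :: rest) = rest from rfl]
        rw [ih rest [] (cur.reverse :: acc) (by simp at h; omega)]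
        obtain ⟨hd, tl, hE⟩ := List.exists_cons_of_ne_nil (pvLines_ne_nil rest)
        simp [pvLines, hE]
      · have hpre : ['\n'].isPrefixOf (c :: rest) = false := by
          simp [List.isPrefixOf]
          exact fun hb => absurd hb.symm hc
        rw [if_neg (by simp [hpre])]
        rw [ih rest (c :: cur) acc (by simp at h; omega)]
        obtain ⟨hd, tl, hE⟩ := List.exists_cons_of_ne_nil (pvLines_ne_nil rest)
        simp [pvLines, hc, hE]


theorem splitOn_newline (cs : List Char) :
    PySem.Chars.splitOn cs ['\n'] = pvLines cs := by
  unfold PySem.Chars.splitOn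
  rw [splitOn_go_eq (cs.length + 1) cs [] [] (by omega)]
  obtain ⟨hd, tl, hE⟩ := List.exists_cons_of_ne_nil (pvLines_ne_nil cs)
  simp [hE]


theorem splitOnMax_go_zero (fuel : Nat) (cs cur : List Char) (acc : List (List Char)) :
    PySem.Chars.splitOnMax.go [':', ' '] fuel 0 cs cur acc
      = ((cur.reverse ++ cs) :: acc).reverse := by
  cases fuel with
  | zero => rw [PySem.Chars.splitOnMax.go]
  | succ fuel =>
    cases cs with
    | nil =>
      rw [PySem.Chars.splitOnMax.go]
      · simp
      · omega
    | cons c rest =>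
      rw [PySem.Chars.splitOnMax.go]
      rw [if_pos rfl]

theorem splitOnMax_go_eq : ∀ (fuel : Nat) (cs cur : List Char) (acc : List (List Char)),
    cs.length ≤ fuel →
    PySem.Chars.splitOnMax.go [':', ' '] fuel 1 cs cur acc
      = acc.reverse ++ (match pvBreakCS cs with
          | some ba => [cur.reverse ++ ba.1, ba.2]
          | none => [cur.reverse ++ cs]) := by
  intro fuel
  induction fuel with
  | zero =>
    intro cs cur acc h
    have hcs : cs = [] := by cases cs <;> simp at h ⊢
    subst hcs
    rw [PySem.Chars.splitOnMax.go]
    simp [pvBreakCS]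
  | succ fuel ih =>
    intro cs cur acc h
    cases cs with
    | nil =>
      rw [PySem.Chars.splitOnMax.go]
      · simp [pvBreakCS]
      · omega
    | cons c rest =>
      rw [PySem.Chars.splitOnMax.go]
      rw [if_neg (by omega)]
      cases rest with
      | nil =>
        have hpre : [':', ' '].isPrefixOf [c] = false := by simp [List.isPrefixOf]
        rw [if_neg (by simp [hpre])]
        rw [ih [] (c :: cur) acc (by simp)]
        simp [pvBreakCS]
      | cons d rest2 =>
        by_cases hcd : c = ':' ∧ d = ' '
        · obtain ⟨rfl, rfl⟩ := hcd
          have hpre : [':', ' '].isPrefixOf (':' :: ' ' :: rest2) = true := by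
            simp [List.isPrefixOf]
          rw [if_pos hpre]
          rw [show List.drop ([':', ' '].length) (':' :: ' ' :: rest2) = rest2 from rfl]
          rw [show (1 : Nat) - 1 = 0 from rfl]
          rw [splitOnMax_go_zero fuel rest2 [] (cur.reverse :: acc)]
          simp [pvBreakCS]
        · have hpre : [':', ' '].isPrefixOf (c :: d :: rest2) = false := by
            simp [List.isPrefixOf]
            intro h1 h2
            exact hcd ⟨h1.symm, h2.symm⟩
          rw [if_neg (by simp [hpre])]
          rw [ih (d :: rest2) (c :: cur) acc (by simp at h ⊢; omega)]
          simp only [pvBreakCS, if_neg hcd]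
          cases hbk : pvBreakCS (d :: rest2) <;> simp [hbk]


theorem splitOnMax_cs (cs : List Char) :
    PySem.Chars.splitOnMax cs [':', ' '] 1
      = match pvBreakCS cs with
        | some ba => [ba.1, ba.2]
        | none => [cs] := by
  unfold PySem.Chars.splitOnMax
  rw [if_neg (by norm_num)]
  rw [show ((1 : Int).toNat) = 1 from rfl]
  rw [splitOnMax_go_eq (cs.length + 1) cs [] [] (by omega)]
  cases hbk : pvBreakCS cs <;> simp [hbk]

theorem body_eq (acc : List String) (l : List Char) :
    (if PySem.Str.startswith (String.ofList l) "sample " then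
        let parts := (PySem.Str.splitMax? (String.ofList l) ": " 1).getD []
        if parts.length == 2 then acc ++ [parts.getD 1 ""] else acc
      else acc) = acc ++ pvLineOut l := by
  have hsm : PySem.Str.splitMax? (String.ofList l) ": " 1
      = some (List.map String.ofList (PySem.Chars.splitOnMax l [':', ' '] 1)) := by
    simp [PySem.Str.splitMax?, PySem.Chars.splitMax?, show (": ".toList) = [':', ' '] from rfl]
  have hsw : PySem.Str.startswith (String.ofList l) "sample "
      = List.isPrefixOf "sample ".toList l := by
    simp [PySem.Chars.startswith]
  rw [hsw, hsm]
  simp only [Option.getD_some]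
  rw [splitOnMax_cs]
  cases hbk : pvBreakCS l with
  | none =>
    simp only [pvLineOut, hbk]
    by_cases hpre : List.isPrefixOf "sample ".toList l = true
    · rw [if_pos hpre, if_pos hpre]
      simp
    · rw [if_neg hpre, if_neg hpre]
      simp
  | some ba =>
    simp only [pvLineOut, hbk]
    by_cases hpre : List.isPrefixOf "sample ".toList l = true
    · rw [if_pos hpre, if_pos hpre]
      simp [List.getD]
    · rw [if_neg hpre, if_neg hpre]
      simp

theorem extract_samples_eq_flatMap (output : String) :
    extract_samples output = (pvLines output.toList).flatMap pvLineOut := by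
  have hsplit : PySem.Str.split? output "\n"
      = some (List.map String.ofList (pvLines output.toList)) := by
    simp [PySem.Str.split?, PySem.Chars.split?, splitOn_newline,
      show ("\n".toList) = ['\n'] from rfl]
  unfold extract_samples
  rw [hsplit]
  simp only [Option.getD_some]
  rw [List.foldl_map]
  rw [List.foldl_ext _ (fun acc l => acc ++ pvLineOut l) []
    (fun acc l _ => body_eq acc l)]
  rw [PySem.List.foldl_append_eq_flatMap]
  simp


theorem prefix_firstLine (p : List Char) (hp : '\n' ∉ p) :
    ∀ cs, List.isPrefixOf p cs = List.isPrefixOf p (pvFirstLine cs) := by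
  induction p with
  | nil => intro cs; simp [List.isPrefixOf]
  | cons a p' ihp =>
    intro cs
    have ha : a ≠ '\n' := fun h => hp (h ▸ List.mem_cons_self)
    have hp' : '\n' ∉ p' := fun h => hp (List.mem_cons_of_mem _ h)
    cases cs with
    | nil => simp [pvFirstLine]
    | cons c rest =>
      by_cases hc : c = '\n'
      · subst hc
        simp [pvFirstLine, List.isPrefixOf]
        exact fun h => absurd h ha
      · simp [pvFirstLine, hc, List.isPrefixOf, ihp hp' rest]


theorem firstLine_append (p : List Char) (hp : '\n' ∉ p) (u : List Char) :
    pvFirstLine (p ++ u) = p ++ pvFirstLine u := by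
  induction p with
  | nil => simp
  | cons a p' ihp =>
    have ha : a ≠ '\n' := fun h => hp (h ▸ List.mem_cons_self)
    have hp' : '\n' ∉ p' := fun h => hp (List.mem_cons_of_mem _ h)
    simp [pvFirstLine, ha, ihp hp']


theorem breakCS_append (p : List Char) (hp : ':' ∉ p) (u : List Char) :
    pvBreakCS (p ++ u) = (pvBreakCS u).map (fun ba => (p ++ ba.1, ba.2)) := by
  induction p with
  | nil => cases hbk : pvBreakCS u <;> simp [hbk]
  | cons a p' ihp =>
    have ha : a ≠ ':' := fun h => hp (h ▸ List.mem_cons_self)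
    have hp' : ':' ∉ p' := fun h => hp (List.mem_cons_of_mem _ h)
    rw [List.cons_append]
    cases hpu : p' ++ u with
    | nil =>
      obtain ⟨hp'nil, hunil⟩ := List.append_eq_nil_iff.mp hpu
      subst hunil
      simp [hpu, pvBreakCS]
    | cons e tl =>
      have harm : pvBreakCS (a :: e :: tl)
          = match pvBreakCS (e :: tl) with
            | some ba => some (a :: ba.1, ba.2)
            | none => none := by
        simp only [pvBreakCS]
        rw [if_neg (by intro hh; exact ha hh.1)]
      rw [harm, ← hpu, ihp hp']
      cases hbk : pvBreakCS u <;> simp [hbk]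

theorem capture_eq_firstLine (cs : List Char) : pvCapture cs = pvFirstLine cs := by
  induction cs with
  | nil => simp [pvCapture, pvFirstLine]
  | cons c rest ih => by_cases hc : c = '\n' <;> simp [pvCapture, pvFirstLine, hc, ih]


theorem ng_break : ∀ (t : List Char),
    (pvBreakCS (pvFirstLine t)).map Prod.snd = (pvNonGreedy t).map pvFirstLine := by
  intro t
  induction t using pvNonGreedy.induct with
  | case1 => simp [pvNonGreedy, pvFirstLine, pvBreakCS]
  | case2 c =>
    by_cases hc : c = '\n' <;> simp [pvNonGreedy, pvFirstLine, pvBreakCS, hc]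
  | case3 c d rest hcd =>
    obtain ⟨rfl, rfl⟩ := hcd
    simp [pvNonGreedy, pvFirstLine, pvBreakCS]
  | case4 d rest hcd =>
    simp [pvNonGreedy, pvFirstLine, pvBreakCS, hcd]
  | case5 c d rest hcd hc ih =>
    have hstep : pvNonGreedy (c :: d :: rest) = pvNonGreedy (d :: rest) := by
      simp only [pvNonGreedy, if_neg hcd, if_neg hc]
    rw [hstep, ← ih]
    rw [show pvFirstLine (c :: d :: rest) = c :: pvFirstLine (d :: rest) from by
      simp [pvFirstLine, hc]]
    by_cases hd : d = '\n'
    · subst hd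
      simp [pvFirstLine, pvBreakCS]
    · rw [show pvFirstLine (d :: rest) = d :: pvFirstLine rest from by
        simp [pvFirstLine, hd]]
      have harm : pvBreakCS (c :: d :: pvFirstLine rest)
          = match pvBreakCS (d :: pvFirstLine rest) with
            | some ba => some (c :: ba.1, ba.2)
            | none => none := by
        simp only [pvBreakCS]
        rw [if_neg hcd]
      rw [harm]
      cases hbk : pvBreakCS (d :: pvFirstLine rest) <;> simp [hbk]


theorem pvLines_structure (cs : List Char) :
    pvLines cs = pvFirstLine cs ::
      (match pvNextLine cs with | some r => pvLines r | none => []) := by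
  induction cs with
  | nil => simp [pvLines, pvFirstLine, pvNextLine]
  | cons c rest ih =>
    by_cases hc : c = '\n'
    · simp [pvLines, pvFirstLine, pvNextLine, hc]
    · simp only [pvLines, pvFirstLine, pvNextLine, if_neg hc]
      rw [ih]
      simp


theorem pvFindall_eq_flatMap : ∀ (cs : List Char),
    pvFindall cs = (pvLines cs).flatMap pvLineOut := by
  intro cs
  induction cs using pvFindall.induct with
  | _ cs ih =>
    rw [pvFindall]
    rw [pvLines_structure cs]
    rw [List.flatMap_cons]
    have hhead : (match (if List.isPrefixOf "sample ".toList cs then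
          pvNonGreedy (List.drop 7 cs) else none) with
       | some after => [String.ofList (pvCapture after)]
       | none => []) = pvLineOut (pvFirstLine cs) := by
      unfold pvLineOut
      rw [← prefix_firstLine "sample ".toList (by decide) cs]
      by_cases hpre : List.isPrefixOf "sample ".toList cs
      · rw [if_pos hpre, if_pos hpre]
        obtain ⟨t, rfl⟩ := List.isPrefixOf_iff_prefix.mp hpre
        rw [show (7 : Nat) = ("sample ".toList).length from rfl, List.drop_left]
        rw [firstLine_append "sample ".toList (by decide) t]
        rw [breakCS_append "sample ".toList (by decide) (pvFirstLine t)]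
        have hng := ng_break t
        cases hngc : pvNonGreedy t with
        | none =>
          rw [hngc] at hng
          cases hbk : pvBreakCS (pvFirstLine t) with
          | none => simp [hbk]
          | some ba => rw [hbk] at hng; simp at hng
        | some after =>
          rw [hngc] at hng
          cases hbk : pvBreakCS (pvFirstLine t) with
          | none => rw [hbk] at hng; simp at hng
          | some ba =>
            rw [hbk] at hng
            simp only [Option.map_some, Option.some.injEq] at hng
            simp [capture_eq_firstLine, hng]
      · rw [if_neg hpre, if_neg hpre]
    rw [hhead]
    congr 1
    cases hnl : pvNextLine cs with
    | some rest => simpa [hnl] using ih rest hnl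
    | none => simp [hnl]


-- ===== VERDICT (by name: the statement is the Claim_ definition above) =====
theorem extract_samples_spec : Claim_equal_extract_samples := by
  intro output _
  unfold Spec_extract_samples
  rw [extract_samples_eq_flatMap, extract_samples_alt, pvFindall_eq_flatMap]
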